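-- pv_equiv track=rewrite | github.com/felipervm/comp2152_labs | Week06/lab06_starter_windows.py | parse_nslookup
-- ===== SOURCE A (Python) =====
-- def parse_nslookup(output):
--     lines = output.strip().split("\n")
--     result = {"ip": "Not found", "status": "Failed"}
--
--     found_answer = False
--     for line in lines:
--         if "Non-authoritative answer" in line:
--             found_answer = True
--         if found_answer and "Address:" in line:
--             ip = line.split("Address:")[1].strip()
--             if ip and "." in ip:
--                 result["ip"] = ip
--                 result["status"] = "Success"
--                 break
--
--     return result
-- ===== SOURCE B (Python) =====
-- def parse_nslookup(output):
--     lines = output.strip().split("\n")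
--     # Build full index tables with comprehensions (no early exit, no flag):
--     anchors = [i for i, line in enumerate(lines) if "Non-authoritative answer" in line]
--     candidates = [(i, line.split("Address:")[1].strip()) for i, line in enumerate(lines) if "Address:" in line]
--     # Join: valid ips on or after the first anchor line.
--     hits = [ip for i, ip in candidates if ip and "." in ip and anchors and i >= anchors[0]]
--     if hits:
--         return {"ip": hits[0], "status": "Success"}
--     return {"ip": "Not found", "status": "Failed"}
-- ===== Notes on version B (the rewrite author's own statement) =====
-- stated objective: alternative
-- what changed: B replaces A's flag-threaded early-exit loop by a table build-and-join: comprehensions materialise the full list of anchor line indices and the full list of (index, ip) Address candidates, then a relational filter (valid ip AND index >= first anchor index) selects the hits and the first hit is returned.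
import Mathlib
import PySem

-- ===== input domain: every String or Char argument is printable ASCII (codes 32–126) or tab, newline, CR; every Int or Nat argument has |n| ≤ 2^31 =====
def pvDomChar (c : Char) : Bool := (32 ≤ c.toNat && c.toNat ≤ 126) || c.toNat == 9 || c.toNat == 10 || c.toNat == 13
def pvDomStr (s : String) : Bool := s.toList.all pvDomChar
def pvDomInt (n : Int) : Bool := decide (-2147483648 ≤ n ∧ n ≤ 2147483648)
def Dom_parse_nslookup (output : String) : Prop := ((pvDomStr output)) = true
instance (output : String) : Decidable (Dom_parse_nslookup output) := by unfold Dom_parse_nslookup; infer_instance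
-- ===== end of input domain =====

-- B replaces A's flag-threaded early-exit loop by a table build-and-join: full anchor-index and
-- Address-candidate tables built by comprehensions, then a relational filter and first-hit selection.

-- shared transliterations of the identical Python expressions both versions contain
def pvAnchorP (l : String) : Bool := PySem.Str.isIn "Non-authoritative answer" l
def pvAddrP (l : String) : Bool := PySem.Str.isIn "Address:" l
-- line.split("Address:")[1].strip(): exact where pvAddrP l holds (index 1 then exists)
def pvIp (l : String) : String := PySem.Str.strip (((PySem.Str.split? l "Address:").getD []).getD 1 "")
def pvValid (ip : String) : Bool := (!(ip == "")) && PySem.Str.isIn "." ip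

-- ===== PORT A =====
-- the for-loop with its `found_answer` flag and `break`
def pvALoop (lines : List String) (found : Bool) (result : PySem.Dict String String) : PySem.Dict String String :=
  match lines with
  | [] => result
  | line :: rest =>
    let found := found || pvAnchorP line
    if found && pvAddrP line then
      let ip := pvIp line
      if pvValid ip then
        (result.insert "ip" ip).insert "status" "Success"   -- break
      else pvALoop rest found result
    else pvALoop rest found result

def parse_nslookup (output : String) : List (String × String) :=
  let lines := (PySem.Str.split? (PySem.Str.strip output) "\n").getD []
  let result : PySem.Dict String String := PySem.Dict.ofList [("ip", "Not found"), ("status", "Failed")]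
  (pvALoop lines false result).items

-- ===== PORT B =====
def parse_nslookup_alt (output : String) : List (String × String) :=
  let lines := (PySem.Str.split? (PySem.Str.strip output) "\n").getD []
  -- anchors = [i for i, line in enumerate(lines) if "Non-authoritative answer" in line]
  let anchors := (PySem.List.enumerate lines).filterMap
    (fun p => if pvAnchorP p.2 then some p.1 else none)
  -- candidates = [(i, line.split("Address:")[1].strip()) for i, line in enumerate(lines) if "Address:" in line]
  let candidates := (PySem.List.enumerate lines).filterMap
    (fun p => if pvAddrP p.2 then some (p.1, pvIp p.2) else none)
  -- hits = [ip for i, ip in candidates if ip and "." in ip and anchors and i >= anchors[0]]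
  let hits := (candidates.filter
    (fun q => pvValid q.2 && !anchors.isEmpty && decide (anchors.headD 0 ≤ q.1))).map (·.2)
  match hits.head? with
  | some ip => [("ip", ip), ("status", "Success")]
  | none => [("ip", "Not found"), ("status", "Failed")]

-- ===== PRECONDITION & SPEC =====
def Spec_parse_nslookup (output : String) (out : List (String × String)) : Prop := out = parse_nslookup_alt output
instance (output : String) (out : List (String × String)) : Decidable (Spec_parse_nslookup output out) := by unfold Spec_parse_nslookup; infer_instance

-- ===== CLAIM (what is proved, stated in full; the proofs are below) =====
def Claim_equal_parse_nslookup : Prop := ∀ (output : String), Dom_parse_nslookup output → Spec_parse_nslookup output (parse_nslookup output)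

-- ===== LEMMAS AND PROOFS =====

-- canonical characterisation shared by both proofs
def pvFindAnchor : List String → Option Nat
  | [] => none
  | l :: rest => if pvAnchorP l then some 0 else (pvFindAnchor rest).map (· + 1)

def pvScanOpt : List String → Option String
  | [] => none
  | l :: rest =>
    if pvAddrP l && pvValid (pvIp l) then some (pvIp l) else pvScanOpt rest

def pvCanon (lines : List String) : List (String × String) :=
  match pvFindAnchor lines with
  | none => [("ip", "Not found"), ("status", "Failed")]
  | some k =>
    match pvScanOpt (lines.drop k) with
    | some ip => [("ip", ip), ("status", "Success")]
    | none => [("ip", "Not found"), ("status", "Failed")]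

-- ---- A = canonical ----

theorem pvALoop_true (lines : List String) :
    (pvALoop lines true (PySem.Dict.ofList [("ip", "Not found"), ("status", "Failed")])).items =
      match pvScanOpt lines with
      | some ip => [("ip", ip), ("status", "Success")]
      | none => [("ip", "Not found"), ("status", "Failed")] := by
  induction lines with
  | nil => rfl
  | cons line rest ih =>
    simp only [pvALoop, pvScanOpt, Bool.true_or, Bool.true_and]
    by_cases h1 : pvAddrP line = true
    · by_cases h2 : pvValid (pvIp line) = true
      · simp [h1, h2, PySem.Dict.ofList, PySem.Dict.update, PySem.Dict.empty, PySem.Dict.insert,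
          PySem.Dict.contains]
      · simp only [h1, h2, if_pos, if_neg, Bool.and_false, Bool.false_eq_true, not_false_eq_true]
        exact ih
    · simp only [h1, Bool.false_eq_true, not_false_eq_true, if_neg, Bool.false_and]
      exact ih

theorem pvALoop_false (lines : List String) :
    (pvALoop lines false (PySem.Dict.ofList [("ip", "Not found"), ("status", "Failed")])).items =
      pvCanon lines := by
  induction lines with
  | nil => rfl
  | cons line rest ih =>
    by_cases h : pvAnchorP line = true
    · simp only [pvCanon, pvFindAnchor, h, if_pos, List.drop_zero]
      have := pvALoop_true (line :: rest)
      simp only [pvALoop, h, Bool.false_or, Bool.true_or, Bool.true_and] at this ⊢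
      exact this
    · simp only [pvALoop, h, Bool.or_false, Bool.false_and, Bool.false_eq_true, not_false_eq_true,
        if_neg, pvCanon, pvFindAnchor]
      rw [ih]
      unfold pvCanon
      cases pvFindAnchor rest with
      | none => rfl
      | some k => simp [List.drop_succ_cons]

-- ---- B = canonical ----

-- the anchor table's first entry is the first anchor index, offset by the enumeration start
theorem pvAnchors_head (lines : List String) (s : Int) :
    ((PySem.List.enumerate lines s).filterMap
        (fun p => if pvAnchorP p.2 then some p.1 else none)).head? =
      Option.map (fun k : Nat => s + (k : Int)) (pvFindAnchor lines) := by
  induction lines generalizing s with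
  | nil => rfl
  | cons line rest ih =>
    simp only [PySem.List.enumerate_cons, List.filterMap_cons, pvFindAnchor]
    by_cases h : pvAnchorP line = true
    · simp [h]
    · simp only [h, Bool.false_eq_true, not_false_eq_true, if_neg]
      rw [ih (s + 1)]
      cases pvFindAnchor rest with
      | none => rfl
      | some k =>
        simp only [Option.map_some]
        congr 1
        push_cast
        ring

-- once the threshold is at or below the enumeration start, the join keeps every valid candidate
theorem pvHits_head_all (lines : List String) (s a0 : Int) (h : a0 ≤ s) :
    ((((PySem.List.enumerate lines s).filterMap
        (fun p => if pvAddrP p.2 then some (p.1, pvIp p.2) else none)).filter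
        (fun q => pvValid q.2 && decide (a0 ≤ q.1))).map (·.2)).head? =
      pvScanOpt lines := by
  induction lines generalizing s with
  | nil => rfl
  | cons line rest ih =>
    simp only [PySem.List.enumerate_cons, List.filterMap_cons, pvScanOpt]
    by_cases h1 : pvAddrP line = true
    · simp only [h1, if_pos, Bool.true_and, List.filter_cons]
      by_cases h2 : pvValid (pvIp line) = true
      · simp [h2, h]
      · simp only [h2, Bool.false_eq_true, not_false_eq_true, Bool.false_and, if_neg]
        exact ih (s + 1) (by omega)
    · simp only [h1, Bool.false_eq_true, not_false_eq_true, if_neg, Bool.false_and]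
      exact ih (s + 1) (by omega)

-- with threshold s + k the join selects exactly the suffix from position k on
theorem pvHits_head (lines : List String) (s : Int) (k : Nat) :
    ((((PySem.List.enumerate lines s).filterMap
        (fun p => if pvAddrP p.2 then some (p.1, pvIp p.2) else none)).filter
        (fun q => pvValid q.2 && decide (s + (k : Int) ≤ q.1))).map (·.2)).head? =
      pvScanOpt (lines.drop k) := by
  induction lines generalizing s k with
  | nil => simp [pvScanOpt]
  | cons line rest ih =>
    cases k with
    | zero =>
      simpa using pvHits_head_all (line :: rest) s (s + 0) (by omega)
    | succ j =>
      simp only [PySem.List.enumerate_cons, List.filterMap_cons, List.drop_succ_cons]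
      have harith : s + 1 + (j : Int) = s + ((j + 1 : Nat) : Int) := by push_cast; ring
      have htail := ih (s + 1) j
      rw [harith] at htail
      by_cases h1 : pvAddrP line = true
      · simp only [h1, if_pos, List.filter_cons]
        have hfalse : (pvValid (pvIp line) && decide (s + ((j + 1 : Nat) : Int) ≤ s)) = false := by
          have hlt : ¬ (s + ((j + 1 : Nat) : Int) ≤ s) := by push_cast; omega
          simp [hlt]
        simp only [hfalse]
        exact htail
      · simp only [h1, Bool.false_eq_true, not_false_eq_true, if_neg]
        exact htail

theorem pvAlt_canon (lines : List String) :
    (match ((((PySem.List.enumerate lines 0).filterMap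
        (fun p => if pvAddrP p.2 then some (p.1, pvIp p.2) else none)).filter
        (fun q => pvValid q.2 &&
          !((PySem.List.enumerate lines 0).filterMap
              (fun p => if pvAnchorP p.2 then some p.1 else none)).isEmpty &&
          decide (((PySem.List.enumerate lines 0).filterMap
              (fun p => if pvAnchorP p.2 then some p.1 else none)).headD 0 ≤ q.1))).map (·.2)).head? with
      | some ip => [("ip", ip), ("status", "Success")]
      | none => [("ip", "Not found"), ("status", "Failed")]) = pvCanon lines := by
  cases hanch : pvFindAnchor lines with
  | none =>
    have hempty : ((PySem.List.enumerate lines 0).filterMap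
        (fun p => if pvAnchorP p.2 then some p.1 else none)) = [] :=
      List.head?_eq_none_iff.mp (by rw [pvAnchors_head lines 0, hanch]; rfl)
    rw [hempty]
    simp [pvCanon, hanch]
  | some k =>
    have hhead : ((PySem.List.enumerate lines 0).filterMap
        (fun p => if pvAnchorP p.2 then some p.1 else none)).head? = some (0 + (k : Int)) := by
      rw [pvAnchors_head lines 0, hanch]; rfl
    have hne : ((PySem.List.enumerate lines 0).filterMap
        (fun p => if pvAnchorP p.2 then some p.1 else none)) ≠ [] := by
      intro hc; rw [hc] at hhead; simp at hhead
    have hb : (!((PySem.List.enumerate lines 0).filterMap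
        (fun p => if pvAnchorP p.2 then some p.1 else none)).isEmpty) = true := by
      simp [hne]
    have hD : ((PySem.List.enumerate lines 0).filterMap
        (fun p => if pvAnchorP p.2 then some p.1 else none)).headD 0 = 0 + (k : Int) := by
      rw [List.headD_eq_head?_getD, hhead]; rfl
    simp only [hb, Bool.and_true, hD]
    rw [pvHits_head lines 0 k]
    simp [pvCanon, hanch]

-- ===== VERDICT (by name: the statement is the Claim_ definition above) =====
theorem parse_nslookup_spec : Claim_equal_parse_nslookup := by
  intro output _
  unfold Spec_parse_nslookup
  simp only [parse_nslookup, parse_nslookup_alt]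
  rw [pvALoop_false, pvAlt_canon]
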